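-- pv_equiv track=rewrite | github.com/jerry609/PaperBot | src/paperbot/infrastructure/swarm/worker_tools.py | _compress_install_output
-- ===== SOURCE A (Python) =====
-- from typing import Any, Dict, List, Optional
--
-- def _compress_install_output(output: str) -> str:
--     lines = output.splitlines()
--     kept: List[str] = []
--     for line in lines:
--         lower = line.lower().strip()
--         if any(
--             keyword in lower
--             for keyword in (
--                 "successfully installed",
--                 "already satisfied",
--                 "error",
--                 "failed",
--                 "not found",
--                 "installed",
--                 "collecting",
--                 "warning",
--             )
--         ):
--             kept.append(line)
--
--     if not kept:
--         return "(install completed, no notable output)"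
--     return "\n".join(kept[-20:])
-- ===== SOURCE B (Python) =====
-- from typing import List
--
-- _KEYWORDS = (
--     "successfully installed",
--     "already satisfied",
--     "error",
--     "failed",
--     "not found",
--     "installed",
--     "collecting",
--     "warning",
-- )
--
--
-- def _compress_install_output(output: str) -> str:
--     # Walk the lines back-to-front, keeping a capped buffer of the last
--     # 20 notable lines and stopping as soon as it is full.
--     buf: List[str] = []
--     for line in reversed(output.splitlines()):
--         lower = line.lower().strip()
--         if any(keyword in lower for keyword in _KEYWORDS):
--             buf.append(line)
--             if len(buf) == 20:
--                 break
--     if not buf: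
--         return "(install completed, no notable output)"
--     return "\n".join(reversed(buf))
-- ===== Notes on version B (the rewrite author's own statement) =====
-- stated objective: alternative
-- what changed: B scans the lines back-to-front maintaining a 20-capped buffer with early break, then reverses it, instead of filtering all lines and slicing kept[-20:].
import Mathlib
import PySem

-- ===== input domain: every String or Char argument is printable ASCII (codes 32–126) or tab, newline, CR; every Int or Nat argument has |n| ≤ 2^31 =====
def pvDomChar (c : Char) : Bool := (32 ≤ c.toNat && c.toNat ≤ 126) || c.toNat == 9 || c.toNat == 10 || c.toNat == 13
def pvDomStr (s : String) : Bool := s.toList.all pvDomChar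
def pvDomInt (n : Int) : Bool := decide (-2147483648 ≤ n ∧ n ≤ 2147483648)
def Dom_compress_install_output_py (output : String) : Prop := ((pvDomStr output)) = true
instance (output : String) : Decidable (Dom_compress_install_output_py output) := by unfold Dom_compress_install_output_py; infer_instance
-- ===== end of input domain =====

-- B walks the lines back-to-front with a capped 20-line buffer and early stop, instead of
-- filtering everything and slicing the tail; same return value (objective: alternative).

-- shared keyword test ('any(keyword in lower for keyword in (...))' — identical text in both Pythons)
def pvKeywordHit (line : String) : Bool :=
  let lower := PySem.Str.strip (PySem.Str.lower line)
  ["successfully installed", "already satisfied", "error", "failed",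
   "not found", "installed", "collecting", "warning"].any
    (fun keyword => PySem.Str.isIn keyword lower)

-- ===== PORT A =====
def compress_install_output_py (output : String) : String :=
  let lines := PySem.Str.splitlines output
  let kept := lines.foldl (fun acc line => if pvKeywordHit line then acc ++ [line] else acc) []
  if kept = [] then "(install completed, no notable output)"
  else PySem.Str.join "\n" (PySem.List.slice kept (some (-20)) none)

-- ===== PORT B =====
-- loop 'for line in reversed(lines): … append; break at 20'
def pvAltCollect : List String → List String → List String
  | [], buf => buf
  | line :: rest, buf =>
    if pvKeywordHit line then
      let buf' := buf ++ [line]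
      if buf'.length = 20 then buf' else pvAltCollect rest buf'
    else pvAltCollect rest buf

def compress_install_output_py_alt (output : String) : String :=
  let buf := pvAltCollect (PySem.Str.splitlines output).reverse []
  if buf = [] then "(install completed, no notable output)"
  else PySem.Str.join "\n" buf.reverse

-- ===== PRECONDITION & SPEC =====
def Spec_compress_install_output_py (output : String) (out : String) : Prop := out = compress_install_output_py_alt output
instance (output : String) (out : String) : Decidable (Spec_compress_install_output_py output out) := by unfold Spec_compress_install_output_py; infer_instance

-- ===== CLAIM (what is proved, stated in full; the proofs are below) =====
def Claim_equal_compress_install_output_py : Prop := ∀ (output : String), Dom_compress_install_output_py output → Spec_compress_install_output_py output (compress_install_output_py output)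

-- ===== LEMMAS AND PROOFS =====

-- the capped reverse collector is 'filter then take' of what is still missing
theorem pvAltCollect_eq (xs buf : List String) (h : buf.length < 20) :
    pvAltCollect xs buf = buf ++ (xs.filter pvKeywordHit).take (20 - buf.length) := by
  induction xs generalizing buf with
  | nil => simp [pvAltCollect]
  | cons line rest ih =>
    by_cases hp : pvKeywordHit line
    · by_cases hfull : (buf ++ [line]).length = 20
      · have h1 : 20 - buf.length = 1 := by simp at hfull; omega
        simp [pvAltCollect, hp, hfull, h1, List.take_succ_cons]
      · have hlt : (buf ++ [line]).length < 20 := by simp at hfull ⊢; omega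
        have h2 : 20 - buf.length = (20 - (buf ++ [line]).length) + 1 := by
          simp at hfull ⊢; omega
        rw [pvAltCollect, if_pos hp, if_neg hfull, ih _ hlt]
        simp [hp, h2, List.take_succ_cons]
    · rw [pvAltCollect, if_neg hp, ih _ h]
      simp [hp]

-- B's buffer is the reversed last-20 of A's kept list
theorem buf_eq (lines : List String) :
    pvAltCollect lines.reverse [] =
      ((lines.filter pvKeywordHit).reverse).take 20 := by
  rw [pvAltCollect_eq lines.reverse [] (by norm_num)]
  simp [List.filter_reverse]

-- ===== VERDICT (by name: the statement is the Claim_ definition above) =====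
theorem compress_install_output_py_spec : Claim_equal_compress_install_output_py := by
  intro output _
  unfold Spec_compress_install_output_py compress_install_output_py compress_install_output_py_alt
  set lines := PySem.Str.splitlines output with hlines
  have hkept : lines.foldl (fun acc line => if pvKeywordHit line then acc ++ [line] else acc) []
      = lines.filter pvKeywordHit := by
    simpa using PySem.List.foldl_append_if pvKeywordHit id lines []
  simp only [hkept, buf_eq]
  set kept := lines.filter pvKeywordHit with hk
  by_cases hnil : kept = []
  · simp [hnil]
  · have hbuf : (kept.reverse.take 20) ≠ [] := by
      simp [List.take_eq_nil_iff, hnil]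
    rw [if_neg hnil, if_neg hbuf]
    rw [List.take_reverse, List.reverse_reverse,
        PySem.List.slice_from_neg_ofNat kept 20 (by norm_num)]
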